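-- pv_equiv track=rewrite | github.com/its-sachin/Codeforces | 765/C_Road_Optimization.py | a1
-- ===== SOURCE A (Python) =====
-- def a1(n,l,k,A,D):
--     D.append(l)
--     DP=[[1<<60]*(k+1) for i in range(n+1)]
--     DP[0][0]=0
--
--     for i in range(n):
--         a=A[i]
--         for j in range(k+1):
--             for to in range(i+1,n+1):
--                 if j+to-i-1<=k:
--                     DP[to][j+to-i-1]=min(DP[to][j+to-i-1],DP[i][j]+a*(D[to]-D[i]))
--
--     return min(DP[-1])
-- ===== SOURCE B (Python) =====
-- def a1(n, l, k, A, D):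
--     # Top-down: memoized recursion f(p, q) = min capped cost to reach point p with exactly q signs removed.
--     D.append(l)
--     big = 1 << 60
--     memo = {}
--
--     def f(p, q):
--         if p == 0:
--             return 0 if q == 0 else big
--         if (p, q) in memo:
--             return memo[(p, q)]
--         best = big
--         for t in range(min(p, q + 1)):
--             s = p - 1 - t
--             c = f(s, q - t) + A[s] * (D[p] - D[s])
--             if c < best:
--                 best = c
--         memo[(p, q)] = best
--         return best
--
--     return min(f(n, j) for j in range(k + 1))
-- ===== Notes on version B (the rewrite author's own statement) =====
-- stated objective: alternative
-- what changed: Replaces A's bottom-up push tabulation (triple nested loop allocating the whole (n+1)x(k+1) table and relaxing every later destination from each source, then min over the last row) by a top-down memoized recursion f(p,q) driven from the answer states, which computes only the states actually demanded, stores them in a dictionary, and needs no table allocation or destination scan with its guard.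
import Mathlib
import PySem

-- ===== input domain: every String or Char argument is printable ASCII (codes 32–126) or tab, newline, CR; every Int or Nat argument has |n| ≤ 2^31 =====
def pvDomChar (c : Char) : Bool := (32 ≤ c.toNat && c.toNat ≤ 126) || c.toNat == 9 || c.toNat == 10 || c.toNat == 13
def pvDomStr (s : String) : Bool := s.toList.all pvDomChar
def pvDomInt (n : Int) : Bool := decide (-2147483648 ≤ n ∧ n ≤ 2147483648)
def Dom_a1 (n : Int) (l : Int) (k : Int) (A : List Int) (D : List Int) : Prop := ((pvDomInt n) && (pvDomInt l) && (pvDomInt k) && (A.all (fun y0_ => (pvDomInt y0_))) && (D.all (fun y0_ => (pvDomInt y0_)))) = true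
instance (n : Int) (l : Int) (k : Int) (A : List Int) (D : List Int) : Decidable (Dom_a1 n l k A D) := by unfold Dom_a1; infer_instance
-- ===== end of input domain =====

-- B replaces A's bottom-up push tabulation (triple loop over source, count and destination,
-- min over the last table row) by a top-down memoized recursion driven from the answer states.
-- Both A and B mutate D in place (D.append(l)); the equivalence proved here is about the
-- return value (the mutation is identical in A and B anyway).

-- the Python sentinel 1 << 60
def pvBig : Int := 1152921504606846976

-- Python `min(row)` for a nonempty list (the [] case is unreachable under Pre_a1, where k ≥ 0)
def pyMinList : List Int → Int
  | [] => 0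
  | x :: xs => xs.foldl min x

-- ===== PORT A =====
-- The 2D table DP is a List (List Int); get2/set2 are plain indexed read and in-place write
-- (all writes are in range under Pre_a1, exactly as in Python). The loops, their order, the
-- guard and the min-updates are exactly those of the Python.
def get2 (DP : List (List Int)) (p q : Nat) : Int := (DP.getD p []).getD q 0
def set2 (DP : List (List Int)) (p q : Nat) (v : Int) : List (List Int) :=
  DP.set p ((DP.getD p []).set q v)

def pushInnerL (A Dl : List Int) (k : Int) (N m j : Nat) (DP : List (List Int)) : List (List Int) :=
  (List.range (N - m)).foldl (fun DP (s : Nat) =>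
    if (j : Int) + (s : Int) ≤ k then
      set2 DP (m+1+s) (j+s)
        (min (get2 DP (m+1+s) (j+s)) (get2 DP m j + A.getD m 0 * (Dl.getD (m+1+s) 0 - Dl.getD m 0)))
    else DP) DP

def pushStepL (A Dl : List Int) (k : Int) (N K m : Nat) (DP : List (List Int)) : List (List Int) :=
  (List.range K).foldl (fun DP j => pushInnerL A Dl k N m j DP) DP


def a1 (n : Int) (l : Int) (k : Int) (A : List Int) (D : List Int) : Int :=
  let Dl := D ++ [l]                         -- D.append(l)
  let N := n.toNat
  let K := (k+1).toNat
  let DP0 := (List.range (N+1)).map (fun _ => List.replicate K pvBig)  -- [[1<<60]*(k+1) …]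
  let DP1 := set2 DP0 0 0 0                  -- DP[0][0] = 0
  let DPf := (List.range N).foldl (fun DP m => pushStepL A Dl k N K m DP) DP1
  pyMinList (DPf.getD N [])                  -- min(DP[-1])

-- ===== PORT B =====
-- f(p, q): memoized recursion, `memo` is the Python dict keyed by (p, q); goList is the
-- `for t in range(min(p, q+1))` loop threading the memo (pm1 stands for p-1, so the
-- destination point is pm1+1 and the source is s = pm1 - t, exactly Python's p-1-t).
-- `fuel` only bounds the recursion depth to make it structural (the depth is at most p,
-- and every call keeps p ≤ fuel, so fuel never changes the computed value).
def goList (f : Nat → Nat → PySem.Dict (Nat × Nat) Int → Int × PySem.Dict (Nat × Nat) Int)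
    (A Dl : List Int) (pm1 q : Nat) :
    List Nat → Int → PySem.Dict (Nat × Nat) Int → Int × PySem.Dict (Nat × Nat) Int
  | [], best, memo => (best, memo)
  | t :: ts', best, memo =>
    let s := pm1 - t
    let r := f s (q - t) memo
    let c := r.1 + A.getD s 0 * (Dl.getD (pm1+1) 0 - Dl.getD s 0)
    goList f A Dl pm1 q ts' (if c < best then c else best) r.2

def fB (A Dl : List Int) :
    Nat → Nat → Nat → PySem.Dict (Nat × Nat) Int → Int × PySem.Dict (Nat × Nat) Int
  | 0, _p, q, memo => ((if q = 0 then (0:Int) else pvBig), memo)   -- fuel 0 forces p = 0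
  | fuel + 1, p, q, memo =>
    if p = 0 then ((if q = 0 then (0:Int) else pvBig), memo)
    else
      match memo.get? (p, q) with
      | some v => (v, memo)
      | none =>
        let r := goList (fB A Dl fuel) A Dl (p - 1) q (List.range (min p (q+1))) pvBig memo
        (r.1, r.2.insert (p, q) r.1)

def a1_alt (n : Int) (l : Int) (k : Int) (A : List Int) (D : List Int) : Int :=
  let Dl := D ++ [l]                         -- D.append(l)
  let N := n.toNat
  let K := (k+1).toNat
  -- min(f(n, j) for j in range(k+1)): evaluate f(n, j) in order, sharing the memo, then min
  let r := (List.range K).foldl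
    (fun (acc : List Int × PySem.Dict (Nat × Nat) Int) j =>
      let fr := fB A Dl N N j acc.2
      (acc.1 ++ [fr.1], fr.2)) ([], PySem.Dict.empty)
  pyMinList r.1

-- ===== PRECONDITION & SPEC =====
-- Pre_a1 is exactly where the Python returns: n < 0 or k < 0 makes DP[0][0] (or min) raise
-- IndexError/ValueError, and A[i] / D[to] raise IndexError when the lists are shorter than n.
def Pre_a1 (n : Int) (l : Int) (k : Int) (A : List Int) (D : List Int) : Prop :=
  0 ≤ n ∧ 0 ≤ k ∧ n ≤ (A.length : Int) ∧ n ≤ (D.length : Int)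
instance (n : Int) (l : Int) (k : Int) (A : List Int) (D : List Int) : Decidable (Pre_a1 n l k A D) := by unfold Pre_a1; infer_instance

def pvWitness_a1 : Int × Int × Int × List Int × List Int := (2, 10, 1, [1, 2], [0, 3])

def Spec_a1 (n : Int) (l : Int) (k : Int) (A : List Int) (D : List Int) (out : Int) : Prop := out = a1_alt n l k A D
instance (n : Int) (l : Int) (k : Int) (A : List Int) (D : List Int) (out : Int) : Decidable (Spec_a1 n l k A D out) := by unfold Spec_a1; infer_instance

-- ===== CLAIM (what is proved, stated in full; the proofs are below) =====
def Claim_equal_a1 : Prop := ∀ (n : Int) (l : Int) (k : Int) (A : List Int) (D : List Int), Dom_a1 n l k A D → Pre_a1 n l k A D → Spec_a1 n l k A D (a1 n l k A D)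

-- ===== LEMMAS AND PROOFS =====

theorem map_getD_self (xs : List Int) : (List.range xs.length).map (fun j => xs.getD j 0) = xs := by
  apply List.ext_getElem
  · simp
  · intro i h1 h2
    simp [List.getD_eq_getElem?_getD, List.getElem?_eq_getElem h2]

theorem foldl_min_init (g : Nat → Int) (ts : List Nat) (b v : Int) :
    ts.foldl (fun best t => min best (g t)) (min b v) = min (ts.foldl (fun best t => min best (g t)) b) v := by
  induction ts generalizing b with
  | nil => rfl
  | cons t ts ih => simp only [List.foldl_cons, min_right_comm b v (g t), ih]

theorem filter_range_nil {a c : Nat} (h : c ≤ a) :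
    (List.range c).filter (fun t => decide (a ≤ t)) = [] := by
  rw [List.filter_eq_nil_iff]
  intro t ht
  simp only [List.mem_range] at ht
  simp only [decide_eq_true_eq]
  omega

theorem filter_range_cons {a c : Nat} (h : a < c) :
    (List.range c).filter (fun t => decide (a ≤ t)) = a :: (List.range c).filter (fun t => decide (a + 1 ≤ t)) := by
  induction c with
  | zero => omega
  | succ c ih =>
    rw [List.range_succ, List.filter_append, List.filter_append]
    by_cases hac : a < c
    · rw [ih hac]
      simp only [List.filter_cons, List.filter_nil]
      have h1 : (decide (a ≤ c)) = true := by simp; omega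
      have h2 : (decide (a + 1 ≤ c)) = true := by simp; omega
      simp [h1]
      omega
    · have hac' : a = c := by omega
      subst hac'
      rw [filter_range_nil (le_refl a), filter_range_nil (a := a+1) (by omega)]
      simp

-- proof-side tabulation of the capped cell values (used as the common specification of
-- both programs' cell values; neither port computes with it)
def pullBody (A Dl : List Int) (rows : List (List Int)) (i j : Nat) : Int :=
  (List.range (min i (j+1))).foldl (fun best t =>
    min best ((rows.getD (i-1-t) []).getD (j-t) 0
               + A.getD (i-1-t) 0 * (Dl.getD i 0 - Dl.getD (i-1-t) 0))) pvBig
def pullRow (A Dl : List Int) (K : Nat) (rows : List (List Int)) (i : Nat) : List Int :=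
  (List.range K).map (pullBody A Dl rows i)
def pRows (A Dl : List Int) (K : Nat) : Nat → List (List Int)
  | 0 => [0 :: List.replicate (K-1) pvBig]
  | m+1 => pRows A Dl K m ++ [pullRow A Dl K (pRows A Dl K m) (m+1)]
def pF (A Dl : List Int) (K : Nat) (i j : Nat) : Int := ((pRows A Dl K i).getD i []).getD j 0

theorem pRows_length (A Dl : List Int) (K : Nat) (m : Nat) : (pRows A Dl K m).length = m + 1 := by
  induction m with
  | zero => rfl
  | succ m ih => simp [pRows, ih]

theorem pRows_getD_mono (A Dl : List Int) (K : Nat) {i m : Nat} (h : i ≤ m) :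
    (pRows A Dl K m).getD i [] = (pRows A Dl K i).getD i [] := by
  induction m with
  | zero =>
    have : i = 0 := by omega
    subst this; rfl
  | succ m ih =>
    rcases Nat.lt_or_ge i (m+1) with hi | hi
    · rw [pRows, List.getD_append _ _ _ _ (by rw [pRows_length]; omega)]
      exact ih (by omega)
    · have : i = m + 1 := by omega
      subst this; rfl

theorem pRows_getD_last (A Dl : List Int) (K : Nat) (m : Nat) :
    (pRows A Dl K (m+1)).getD (m+1) [] = pullRow A Dl K (pRows A Dl K m) (m+1) := by
  rw [pRows, List.getD_append_right _ _ _ _ (by rw [pRows_length])]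
  rw [pRows_length]
  norm_num

theorem pF_zero (A Dl : List Int) (K : Nat) {j : Nat} (hj : j < K) :
    pF A Dl K 0 j = if j = 0 then 0 else pvBig := by
  unfold pF pRows
  rcases j with _ | j
  · rfl
  · simp only [List.getD_cons_zero, List.getD_cons_succ]
    rw [List.getD_eq_getElem _ _ (by rw [List.length_replicate]; omega)]
    simp

theorem pF_succ (A Dl : List Int) (K : Nat) {m j : Nat} (hj : j < K) :
    pF A Dl K (m+1) j = (List.range (min (m+1) (j+1))).foldl (fun best t =>
      min best (pF A Dl K (m-t) (j-t)
                + A.getD (m-t) 0 * (Dl.getD (m+1) 0 - Dl.getD (m-t) 0))) pvBig := by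
  unfold pF
  rw [pRows_getD_last, pullRow, List.getD_eq_getElem _ _ (by simp; omega)]
  simp only [List.getElem_map, List.getElem_range]
  unfold pullBody
  have hb : (fun (best : Int) (t : Nat) =>
      min best (((pRows A Dl K m).getD (m+1-1-t) []).getD (j-t) 0
               + A.getD (m+1-1-t) 0 * (Dl.getD (m+1) 0 - Dl.getD (m+1-1-t) 0)))
      = (fun (best : Int) (t : Nat) =>
      min best (((pRows A Dl K (m-t)).getD (m-t) []).getD (j-t) 0
                + A.getD (m-t) 0 * (Dl.getD (m+1) 0 - Dl.getD (m-t) 0))) := by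
    funext best t
    have h1 : m + 1 - 1 - t = m - t := by omega
    rw [h1, pRows_getD_mono A Dl K (by omega : m - t ≤ m)]
  rw [hb]

theorem set2_length (DP : List (List Int)) (p q : Nat) (v : Int) :
    (set2 DP p q v).length = DP.length := by simp [set2]

theorem getD_set' {α : Type} [Inhabited α] (l : List α) (i j : Nat) (a d : α) :
    (l.set i a).getD j d = if i = j ∧ i < l.length then a else l.getD j d := by
  by_cases hj : j < l.length
  · rw [List.getD_eq_getElem _ _ (by simpa using hj), List.getElem_set]
    split_ifs with h1 h2 h2
    · rfl
    · omega
    · omega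
    · rw [List.getD_eq_getElem _ _ hj]
  · rw [List.getD_eq_default _ _ (by simpa using hj), List.getD_eq_default _ _ (by omega)]
    rw [if_neg (by omega)]

theorem row_set2 (DP : List (List Int)) (p q i : Nat) (v : Int) :
    (set2 DP p q v).getD i [] = if p = i ∧ p < DP.length then (DP.getD p []).set q v else DP.getD i [] := by
  unfold set2
  exact getD_set' DP p i ((DP.getD p []).set q v) []

theorem get2_set2 (DP : List (List Int)) (p q p' q' : Nat) (v : Int) :
    get2 (set2 DP p q v) p' q'
      = if p = p' ∧ q = q' ∧ p < DP.length ∧ q < (DP.getD p []).length then v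
        else get2 DP p' q' := by
  unfold get2
  rw [row_set2]
  split_ifs with h1 h2 h2
  · obtain ⟨hp, hplen⟩ := h1
    subst hp
    rw [getD_set', if_pos ⟨h2.2.1, h2.2.2.2⟩]
  · obtain ⟨hp, hplen⟩ := h1
    subst hp
    rw [getD_set', if_neg (by tauto)]
  · exfalso; exact h1 ⟨h2.1, h2.2.2.1⟩
  · rfl

def Sh (N K : Nat) (DP : List (List Int)) : Prop :=
  DP.length = N + 1 ∧ ∀ i, i < N + 1 → (DP.getD i []).length = K

theorem Sh_set2 {N K : Nat} {DP : List (List Int)} (h : Sh N K DP) (p q : Nat) (v : Int) :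
    Sh N K (set2 DP p q v) := by
  obtain ⟨h1, h2⟩ := h
  refine ⟨by rw [set2_length, h1], ?_⟩
  intro i hi
  rw [row_set2]
  split_ifs with hc
  · rw [List.length_set]
    exact h2 p (by omega)
  · exact h2 i hi

theorem Sh_fold_inner {N K : Nat} (A Dl : List Int) (k : Int) (m j : Nat) (l : List Nat) :
    ∀ DP : List (List Int), Sh N K DP →
      Sh N K (l.foldl (fun DP (s : Nat) =>
        if (j : Int) + (s : Int) ≤ k then
          set2 DP (m+1+s) (j+s)
            (min (get2 DP (m+1+s) (j+s)) (get2 DP m j + A.getD m 0 * (Dl.getD (m+1+s) 0 - Dl.getD m 0)))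
        else DP) DP) := by
  induction l with
  | nil => intro DP h; exact h
  | cons s l ih =>
    intro DP h
    rw [List.foldl_cons]
    split_ifs with hg
    · exact ih _ (Sh_set2 h _ _ _)
    · exact ih _ h

theorem Sh_fold_outer {N K : Nat} (A Dl : List Int) (k : Int) (m : Nat) (l : List Nat) :
    ∀ DP : List (List Int), Sh N K DP →
      Sh N K (l.foldl (fun DP j => pushInnerL A Dl k N m j DP) DP) := by
  induction l with
  | nil => intro DP h; exact h
  | cons j l ih =>
    intro DP h
    rw [List.foldl_cons]
    exact ih _ (Sh_fold_inner A Dl k m j _ DP h)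

theorem innerAuxL {N K : Nat} (A Dl : List Int) (k : Int) (m j : Nat)
    (hcol : ∀ s : Nat, ((j : Int) + (s : Int) ≤ k) → j + s < K) (r : Nat) :
    ∀ (DP : List (List Int)), Sh N K DP → (m + r ≤ N ∨ r = 0) → ∀ p q,
    get2 ((List.range r).foldl (fun DP (s : Nat) =>
      if (j : Int) + (s : Int) ≤ k then
        set2 DP (m+1+s) (j+s)
          (min (get2 DP (m+1+s) (j+s)) (get2 DP m j + A.getD m 0 * (Dl.getD (m+1+s) 0 - Dl.getD m 0)))
      else DP) DP) p q
    = if m < p ∧ p ≤ m + r ∧ q + m + 1 = j + p ∧ ((j : Int) + ((p - m - 1 : Nat) : Int) ≤ k) then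
        min (get2 DP p q) (get2 DP m j + A.getD m 0 * (Dl.getD p 0 - Dl.getD m 0))
      else get2 DP p q := by
  induction r with
  | zero =>
    intro DP hsh hmr p q
    simp only [List.range_zero, List.foldl_nil]
    rw [if_neg (by omega)]
  | succ r ih =>
    intro DP hsh hmr p q
    have hmr' : m + (r + 1) ≤ N := by omega
    rw [List.range_succ, List.foldl_append, List.foldl_cons, List.foldl_nil]
    have hsh' := Sh_fold_inner A Dl k m j (List.range r) DP hsh
    by_cases hg : (j : Int) + (r : Int) ≤ k
    · rw [if_pos hg]
      rw [get2_set2]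
      by_cases hcell : p = m+1+r ∧ q = j+r
      · obtain ⟨hp, hq⟩ := hcell
        subst hp; subst hq
        rw [if_pos ⟨rfl, rfl, by rw [hsh'.1]; omega,
              by rw [hsh'.2 (m+1+r) (by omega)]; exact hcol r hg⟩]
        rw [ih DP hsh (Or.inl (by omega)), ih DP hsh (Or.inl (by omega))]
        rw [if_neg (by omega), if_neg (by omega)]
        rw [if_pos (by refine ⟨by omega, by omega, by omega, by omega⟩)]
      · rw [if_neg (by tauto)]
        rw [ih DP hsh (Or.inl (by omega))]
        split_ifs with h1 h2 h2
        · rfl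
        · exfalso; omega
        · exfalso; omega
        · rfl
    · rw [if_neg hg]
      rw [ih DP hsh (Or.inl (by omega))]
      split_ifs with h1 h2 h2
      · rfl
      · exfalso; omega
      · exfalso; omega
      · rfl

def TT (A Dl : List Int) (K N : Nat) : Nat → Nat → Nat → Int
  | 0 => fun p q => if p = 0 ∧ q = 0 then (0:Int) else pvBig
  | m+1 => fun p q =>
      if m < p ∧ p ≤ N ∧ p ≤ q + m + 1 ∧ q < K then
        min (TT A Dl K N m p q)
            (TT A Dl K N m m (q+m+1-p) + A.getD m 0 * (Dl.getD p 0 - Dl.getD m 0))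
      else TT A Dl K N m p q

theorem outerAuxL {N K : Nat} (A Dl : List Int) (k : Int) (m : Nat)
    (hKiff : ∀ t : Nat, ((t : Int) ≤ k ↔ t < K)) (w : Nat) :
    ∀ (DP : List (List Int)), Sh N K DP → ∀ p q,
    get2 ((List.range w).foldl (fun DP j => pushInnerL A Dl k N m j DP) DP) p q
    = if m < p ∧ p ≤ m + (N - m) ∧ p ≤ q + m + 1 ∧ q + m + 1 - p < w ∧ ((q : Int) ≤ k) then
        min (get2 DP p q) (get2 DP m (q + m + 1 - p) + A.getD m 0 * (Dl.getD p 0 - Dl.getD m 0))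
      else get2 DP p q := by
  have hcol : ∀ (j s : Nat), ((j : Int) + (s : Int) ≤ k) → j + s < K := by
    intro j s hjs
    have := (hKiff (j + s)).mp (by push_cast; omega)
    omega
  induction w with
  | zero =>
    intro DP hsh p q
    simp only [List.range_zero, List.foldl_nil]
    rw [if_neg (by omega)]
  | succ w ih =>
    intro DP hsh p q
    rw [List.range_succ, List.foldl_append, List.foldl_cons, List.foldl_nil]
    have hshw := Sh_fold_outer A Dl k m (List.range w) DP hsh
    rw [pushInnerL]
    rw [innerAuxL A Dl k m w (hcol w) (N - m) _ hshw (by omega)]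
    by_cases hic : m < p ∧ p ≤ m + (N - m) ∧ q + m + 1 = w + p ∧ ((w : Int) + ((p - m - 1 : Nat) : Int) ≤ k)
    · rw [if_pos (by exact ⟨hic.1, hic.2.1, hic.2.2.1, hic.2.2.2⟩)]
      rw [ih DP hsh, ih DP hsh]
      rw [if_neg (by omega), if_neg (by omega)]
      rw [if_pos (by refine ⟨by omega, by omega, by omega, by omega, by omega⟩)]
      have hw : q + m + 1 - p = w := by omega
      rw [hw]
    · rw [if_neg (by omega)]
      rw [ih DP hsh]
      split_ifs with h1 h2 h2
      · rfl
      · exfalso; omega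
      · exfalso; omega
      · rfl

theorem Sh_fold_push {N K : Nat} (A Dl : List Int) (k : Int) (l : List Nat) :
    ∀ DP : List (List Int), Sh N K DP →
      Sh N K (l.foldl (fun DP i => pushStepL A Dl k N K i DP) DP) := by
  induction l with
  | nil => intro DP h; exact h
  | cons i l ih =>
    intro DP h
    rw [List.foldl_cons]
    exact ih _ (Sh_fold_outer A Dl k i (List.range K) DP h)

theorem getD_replicate' {α : Type} [Inhabited α] {n i : Nat} (a d : α) (h : i < n) :
    (List.replicate n a).getD i d = a := by
  rw [List.getD_eq_getElem _ _ (by simpa using h)]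
  simp

theorem push_fold_TTL (A Dl : List Int) (k : Int) (N K : Nat)
    (hKiff : ∀ t : Nat, ((t : Int) ≤ k ↔ t < K)) (hK1 : 1 ≤ K) :
    ∀ m, ∀ p q, p ≤ N → q < K →
      get2 ((List.range m).foldl (fun DP i => pushStepL A Dl k N K i DP)
        (set2 ((List.range (N+1)).map (fun _ => List.replicate K pvBig)) 0 0 0)) p q
      = TT A Dl K N m p q := by
  have hconst : (List.range (N+1)).map (fun _ => List.replicate K pvBig)
      = List.replicate (N+1) (List.replicate K pvBig) := by
    simp
  have hsh0 : Sh N K ((List.range (N+1)).map (fun _ => List.replicate K pvBig)) := by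
    rw [hconst]
    refine ⟨by simp, ?_⟩
    intro i hi
    rw [getD_replicate' _ _ hi]
    simp
  have hget0 : ∀ p q, p ≤ N → q < K →
      get2 ((List.range (N+1)).map (fun _ => List.replicate K pvBig)) p q = pvBig := by
    intro p q hp hq
    unfold get2
    rw [hconst, getD_replicate' _ _ (by omega)]
    exact getD_replicate' _ _ hq
  have hsh1 : Sh N K (set2 ((List.range (N+1)).map (fun _ => List.replicate K pvBig)) 0 0 0) :=
    Sh_set2 hsh0 0 0 0
  set DP1 : List (List Int) :=
    set2 ((List.range (N+1)).map (fun _ => List.replicate K pvBig)) 0 0 0 with hDP1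
  intro m
  induction m with
  | zero =>
    intro p q hp hq
    simp only [List.range_zero, List.foldl_nil]
    rw [hDP1, get2_set2]
    have hTT0 : TT A Dl K N 0 p q = if p = 0 ∧ q = 0 then (0:Int) else pvBig := rfl
    rw [hTT0]
    by_cases hc : p = 0 ∧ q = 0
    · rw [if_pos hc,
        if_pos ⟨hc.1.symm, hc.2.symm, by rw [hsh0.1]; omega, by rw [hsh0.2 0 (by omega)]; omega⟩]
    · rw [if_neg hc, if_neg (by tauto), hget0 p q hp hq]
  | succ m ih =>
    intro p q hp hq
    rw [List.range_succ, List.foldl_append, List.foldl_cons, List.foldl_nil]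
    have hshm := Sh_fold_push A Dl k (List.range m) DP1 hsh1
    rw [pushStepL]
    rw [outerAuxL A Dl k m hKiff K _ hshm p q]
    have hTT : TT A Dl K N (m+1) p q
        = if m < p ∧ p ≤ N ∧ p ≤ q + m + 1 ∧ q < K then
            min (TT A Dl K N m p q)
                (TT A Dl K N m m (q+m+1-p) + A.getD m 0 * (Dl.getD p 0 - Dl.getD m 0))
          else TT A Dl K N m p q := rfl
    rw [hTT]
    have hq2 := hKiff q
    split_ifs with h1 h2 h2
    · rw [ih p q hp hq, ih m (q+m+1-p) (by omega) (by omega)]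
    · exfalso; omega
    · exfalso; omega
    · exact ih p q hp hq

theorem pF_full (A Dl : List Int) (K : Nat) {p q : Nat} (hq : q < K) (hp : 1 ≤ p) :
    (List.range (min p (q+1))).foldl (fun best t =>
      min best (pF A Dl K (p-1-t) (q-t)
                + A.getD (p-1-t) 0 * (Dl.getD p 0 - Dl.getD (p-1-t) 0))) pvBig
    = pF A Dl K p q := by
  rcases p with _ | m
  · omega
  · rw [pF_succ A Dl K hq]
    simp only [Nat.add_sub_cancel]

theorem TT_pF (A Dl : List Int) (K N : Nat) (m : Nat) :
    ∀ p q, q < K → p ≤ N →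
    TT A Dl K N m p q =
      if p = 0 then pF A Dl K 0 q
      else ((List.range (min p (q+1))).filter (fun t => decide (p - m ≤ t))).foldl
             (fun best t => min best (pF A Dl K (p-1-t) (q-t)
                + A.getD (p-1-t) 0 * (Dl.getD p 0 - Dl.getD (p-1-t) 0))) pvBig := by
  induction m with
  | zero =>
    intro p q hq hp
    have hTT : TT A Dl K N 0 p q = if p = 0 ∧ q = 0 then (0:Int) else pvBig := rfl
    rw [hTT]
    rcases Nat.eq_zero_or_pos p with h0 | h1
    · subst h0
      rw [if_pos rfl, pF_zero A Dl K hq]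
      split_ifs with hq0 hq0 <;> simp_all
    · rw [if_neg (by omega), if_neg (by omega), filter_range_nil (by omega), List.foldl_nil]
  | succ m ih =>
    intro p q hq hp
    have hTT : TT A Dl K N (m+1) p q
        = if m < p ∧ p ≤ N ∧ p ≤ q + m + 1 ∧ q < K then
            min (TT A Dl K N m p q)
                (TT A Dl K N m m (q+m+1-p) + A.getD m 0 * (Dl.getD p 0 - Dl.getD m 0))
          else TT A Dl K N m p q := rfl
    rw [hTT]
    rcases Nat.eq_zero_or_pos p with h0 | h1
    · subst h0
      rw [if_neg (by omega), ih 0 q hq (by omega)]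
      rw [if_pos rfl, if_pos rfl]
    · rw [if_neg (by omega : ¬ p = 0)]
      by_cases hc : m < p ∧ p ≤ N ∧ p ≤ q + m + 1 ∧ q < K
      · rw [if_pos hc]
        have hj0 : q + m + 1 - p < K := by omega
        have hrow : TT A Dl K N m m (q + m + 1 - p) = pF A Dl K m (q + m + 1 - p) := by
          rw [ih m _ hj0 (by omega)]
          rcases Nat.eq_zero_or_pos m with hm0 | hm1
          · subst hm0; rw [if_pos rfl]
          · rw [if_neg (by omega)]
            have hfi : (List.range (min m (q+m+1-p+1))).filter (fun t => decide (m - m ≤ t))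
                = List.range (min m (q+m+1-p+1)) := by
              apply List.filter_eq_self.mpr
              intro t _; simp
            rw [hfi, pF_full A Dl K hj0 hm1]
        rw [ih p q hq hp, if_neg (by omega), hrow]
        have hpred1 : (fun t => decide (p - (m+1) ≤ t)) = (fun t => decide (p - 1 - m ≤ t)) := by
          funext t; simp only [decide_eq_decide]; omega
        rw [hpred1]
        rw [filter_range_cons (show p - 1 - m < min p (q+1) by omega)]
        have hpred2 : (fun t => decide (p - 1 - m + 1 ≤ t)) = (fun t => decide (p - m ≤ t)) := by
          funext t; simp only [decide_eq_decide]; omega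
        rw [hpred2]
        simp only [List.foldl_cons]
        rw [foldl_min_init]
        have e1 : p - 1 - (p - 1 - m) = m := by omega
        have e2 : q - (p - 1 - m) = q + m + 1 - p := by omega
        rw [e1, e2]
      · rw [if_neg hc, ih p q hq hp, if_neg (by omega)]
        have hfc : ∀ t ∈ List.range (min p (q+1)),
            (decide (p - (m+1) ≤ t)) = (decide (p - m ≤ t)) := by
          intro t ht; simp only [List.mem_range] at ht
          simp only [decide_eq_decide]; omega
        rw [List.filter_congr hfc]

theorem TT_diag (A Dl : List Int) (K N : Nat) {q : Nat} (hq : q < K) :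
    TT A Dl K N N N q = pF A Dl K N q := by
  rw [TT_pF A Dl K N N N q hq (le_refl N)]
  rcases Nat.eq_zero_or_pos N with h0 | h1
  · subst h0; rw [if_pos rfl]
  · rw [if_neg (by omega)]
    have hfi : (List.range (min N (q+1))).filter (fun t => decide (N - N ≤ t))
        = List.range (min N (q+1)) := by
      apply List.filter_eq_self.mpr
      intro t _; simp
    rw [hfi, pF_full A Dl K hq h1]

-- ===== lemmas about port B (memoized recursion = pF) =====

theorem if_lt_eq_min (b c : Int) : (if c < b then c else b) = min b c := by
  by_cases h : c < b
  · rw [if_pos h, min_eq_right h.le]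
  · rw [if_neg h, min_eq_left (not_lt.mp h)]

def InvM (A Dl : List Int) (K : Nat) (memo : PySem.Dict (Nat × Nat) Int) : Prop :=
  ∀ p q v, memo.get? (p, q) = some v → q < K ∧ v = pF A Dl K p q

theorem InvM_empty (A Dl : List Int) (K : Nat) : InvM A Dl K PySem.Dict.empty := by
  intro p q v h
  rw [PySem.Dict.get?_empty] at h
  exact absurd h (by simp)

theorem goList_spec (A Dl : List Int) (K : Nat)
    (f : Nat → Nat → PySem.Dict (Nat × Nat) Int → Int × PySem.Dict (Nat × Nat) Int)
    (pm1 q : Nat) (hq : q < K)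
    (hf : ∀ s q' m, s ≤ pm1 → q' < K → InvM A Dl K m →
      (f s q' m).1 = pF A Dl K s q' ∧ InvM A Dl K (f s q' m).2) :
    ∀ (ts : List Nat) (best : Int) (memo : PySem.Dict (Nat × Nat) Int), InvM A Dl K memo →
      (goList f A Dl pm1 q ts best memo).1
        = ts.foldl (fun b t => min b (pF A Dl K (pm1-t) (q-t)
            + A.getD (pm1-t) 0 * (Dl.getD (pm1+1) 0 - Dl.getD (pm1-t) 0))) best
      ∧ InvM A Dl K (goList f A Dl pm1 q ts best memo).2 := by
  intro ts
  induction ts with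
  | nil => intro best memo h; exact ⟨rfl, h⟩
  | cons t ts ih =>
    intro best memo hm
    obtain ⟨h1, h2⟩ := hf (pm1 - t) (q - t) memo (by omega) (by omega) hm
    simp only [goList, h1, if_lt_eq_min, List.foldl_cons]
    exact ih _ _ h2

theorem fB_pF (A Dl : List Int) (K : Nat) :
    ∀ (fuel p q : Nat) (memo : PySem.Dict (Nat × Nat) Int), p ≤ fuel → q < K →
      InvM A Dl K memo →
      (fB A Dl fuel p q memo).1 = pF A Dl K p q ∧ InvM A Dl K (fB A Dl fuel p q memo).2 := by
  intro fuel
  induction fuel with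
  | zero =>
    intro p q memo hp hq hInv
    have hp0 : p = 0 := by omega
    subst hp0
    refine ⟨?_, hInv⟩
    show (if q = 0 then (0:Int) else pvBig) = pF A Dl K 0 q
    rw [pF_zero A Dl K hq]
  | succ fuel ih =>
    intro p q memo hp hq hInv
    by_cases hp0 : p = 0
    · subst hp0
      have hred : fB A Dl (fuel+1) 0 q memo = ((if q = 0 then (0:Int) else pvBig), memo) := by
        simp [fB]
      rw [hred]
      exact ⟨by rw [pF_zero A Dl K hq], hInv⟩
    · have hf : ∀ s q' m, s ≤ p - 1 → q' < K → InvM A Dl K m →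
          (fB A Dl fuel s q' m).1 = pF A Dl K s q' ∧ InvM A Dl K (fB A Dl fuel s q' m).2 :=
        fun s q' m hs hq' hm => ih s q' m (by omega) hq' hm
      cases hget : memo.get? (p, q) with
      | some v =>
        simp only [fB, if_neg hp0, hget]
        obtain ⟨_, hv⟩ := hInv p q v hget
        exact ⟨hv, hInv⟩
      | none =>
        obtain ⟨h1, h2⟩ := goList_spec A Dl K (fB A Dl fuel) (p-1) q hq hf
          (List.range (min p (q+1))) pvBig memo hInv
        have hp1 : (fun (b : Int) (t : Nat) => min b (pF A Dl K (p-1-t) (q-t)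
            + A.getD (p-1-t) 0 * (Dl.getD (p-1+1) 0 - Dl.getD (p-1-t) 0)))
            = (fun (b : Int) (t : Nat) => min b (pF A Dl K (p-1-t) (q-t)
            + A.getD (p-1-t) 0 * (Dl.getD p 0 - Dl.getD (p-1-t) 0))) := by
          funext b t
          have hpp : p - 1 + 1 = p := by omega
          rw [hpp]
        have hval : (goList (fB A Dl fuel) A Dl (p-1) q (List.range (min p (q+1))) pvBig memo).1
            = pF A Dl K p q := by
          rw [h1, hp1, pF_full A Dl K hq (by omega)]
        simp only [fB, if_neg hp0, hget]
        refine ⟨hval, ?_⟩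
        intro p' q' v' hget'
        rw [PySem.Dict.get?_insert] at hget'
        by_cases hk : (p', q') = (p, q)
        · rw [if_pos hk] at hget'
          obtain ⟨hp', hq'⟩ := Prod.mk.injEq .. ▸ hk
          refine ⟨by omega, ?_⟩
          simp only [Option.some.injEq] at hget'
          rw [← hget', hval, hp', hq']
        · rw [if_neg hk] at hget'
          exact h2 p' q' v' hget'

theorem foldB (A Dl : List Int) (K N : Nat) :
    ∀ (js : List Nat) (acc : List Int × PySem.Dict (Nat × Nat) Int),
      (∀ j ∈ js, j < K) → InvM A Dl K acc.2 →
      (js.foldl (fun (acc : List Int × PySem.Dict (Nat × Nat) Int) j =>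
          let fr := fB A Dl N N j acc.2
          (acc.1 ++ [fr.1], fr.2)) acc).1
        = acc.1 ++ js.map (fun j => pF A Dl K N j) := by
  intro js
  induction js with
  | nil => intro acc _ _; simp
  | cons j js ih =>
    intro acc hjs hInv
    rw [List.foldl_cons]
    obtain ⟨hval, hinv2⟩ := fB_pF A Dl K N N j acc.2 (le_refl N) (hjs j (by simp)) hInv
    rw [ih _ (fun j hj => hjs j (by simp [hj])) hinv2]
    simp [hval]

-- ===== VERDICT (by name: the statement is the Claim_ definition above) =====
theorem a1_spec : Claim_equal_a1 := by
  intro n l k A D _ hPre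
  obtain ⟨hn, hk, hA, hD⟩ := hPre
  show a1 n l k A D = a1_alt n l k A D
  have hKiff : ∀ t : Nat, ((t : Int) ≤ k ↔ t < (k+1).toNat) := by intro t; omega
  have hK1 : 1 ≤ (k+1).toNat := by omega
  show pyMinList (((List.range n.toNat).foldl
          (fun DP m => pushStepL A (D++[l]) k n.toNat ((k+1).toNat) m DP)
          (set2 ((List.range (n.toNat+1)).map (fun _ => List.replicate ((k+1).toNat) pvBig)) 0 0 0)).getD n.toNat [])
      = pyMinList ((List.range ((k+1).toNat)).foldl
          (fun (acc : List Int × PySem.Dict (Nat × Nat) Int) j =>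
            let fr := fB A (D++[l]) n.toNat n.toNat j acc.2
            (acc.1 ++ [fr.1], fr.2)) ([], PySem.Dict.empty)).1
  rw [foldB A (D++[l]) ((k+1).toNat) n.toNat (List.range ((k+1).toNat)) ([], PySem.Dict.empty)
        (fun j hj => List.mem_range.mp hj) (InvM_empty A (D++[l]) ((k+1).toNat))]
  rw [List.nil_append]
  congr 1
  have hsh0 : Sh n.toNat ((k+1).toNat)
      ((List.range (n.toNat+1)).map (fun _ => List.replicate ((k+1).toNat) pvBig)) := by
    refine ⟨by simp, ?_⟩
    intro i hi
    rw [show (List.range (n.toNat+1)).map (fun _ => List.replicate ((k+1).toNat) pvBig)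
          = List.replicate (n.toNat+1) (List.replicate ((k+1).toNat) pvBig) from by simp]
    rw [getD_replicate' _ _ hi]
    simp
  have hshf := Sh_fold_push A (D++[l]) k (List.range n.toNat) _ (Sh_set2 hsh0 0 0 0)
  have hlenA := hshf.2 n.toNat (by omega)
  conv_lhs =>
    rw [← map_getD_self (((List.range n.toNat).foldl
          (fun DP m => pushStepL A (D++[l]) k n.toNat ((k+1).toNat) m DP)
          (set2 ((List.range (n.toNat+1)).map (fun _ => List.replicate ((k+1).toNat) pvBig)) 0 0 0)).getD n.toNat [])]
  rw [hlenA]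
  apply List.map_congr_left
  intro q hqmem
  rw [List.mem_range] at hqmem
  have h1 : (((List.range n.toNat).foldl
        (fun DP m => pushStepL A (D++[l]) k n.toNat ((k+1).toNat) m DP)
        (set2 ((List.range (n.toNat+1)).map (fun _ => List.replicate ((k+1).toNat) pvBig)) 0 0 0)).getD n.toNat []).getD q 0
      = TT A (D++[l]) ((k+1).toNat) n.toNat n.toNat n.toNat q :=
    push_fold_TTL A (D++[l]) k n.toNat ((k+1).toNat) hKiff hK1 n.toNat n.toNat q (le_refl _) hqmem
  rw [h1, TT_diag A (D++[l]) ((k+1).toNat) n.toNat hqmem]
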